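-- pv_equiv track=rewrite | github.com/Ladsgroup/tofawiki | tofawiki/util/translate_util.py | en2fa
-- ===== SOURCE A (Python) =====
-- def en2fa(i):
--     fachars = u"۰۱۲۳۴۵۶۷۸۹"
--     try:
--         b = str(i)
--     except:
--         b = i
--     for i in range(0, 10):
--         b = b.replace(str(i), fachars[i])
--     return b
-- ===== SOURCE B (Python) =====
-- _FA = str.maketrans("0123456789", "\u06f0\u06f1\u06f2\u06f3\u06f4\u06f5\u06f6\u06f7\u06f8\u06f9")
--
--
-- def en2fa(i):
--     try:
--         b = str(i)
--     except:
--         b = i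
--     return b.translate(_FA)
-- ===== Notes on version B (the rewrite author's own statement) =====
-- stated objective: idiomatic
-- what changed: Replaces A's ten sequential str.replace scans with a single table-driven pass using str.maketrans/str.translate built once.
import Mathlib
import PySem

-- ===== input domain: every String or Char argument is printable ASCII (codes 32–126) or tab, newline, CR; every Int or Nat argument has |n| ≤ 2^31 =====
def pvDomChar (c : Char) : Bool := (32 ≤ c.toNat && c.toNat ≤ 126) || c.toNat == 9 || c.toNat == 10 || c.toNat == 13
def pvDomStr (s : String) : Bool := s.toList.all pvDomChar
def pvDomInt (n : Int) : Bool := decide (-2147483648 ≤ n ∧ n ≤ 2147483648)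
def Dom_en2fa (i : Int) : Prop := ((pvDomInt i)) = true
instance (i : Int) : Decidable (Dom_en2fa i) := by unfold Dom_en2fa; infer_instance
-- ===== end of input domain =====

-- B replaces A's ten sequential replace passes with a single table-driven translation pass (str.maketrans/str.translate); same return value for every int.


-- ===== PORT A =====
-- str(i) on an int never raises, so the try/except always takes the try branch.
def en2fa (i : Int) : String :=
  let fachars : String := "۰۱۲۳۴۵۶۷۸۹"
  let b := PySem.Int.toStr i
  (PySem.List.pyRange 0 10 1).foldl
    (fun b j =>
      PySem.Str.replace b (PySem.Int.toStr j)
        (((PySem.Str.pyGet? fachars j).map (fun c => String.ofList [c])).getD ""))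
    b

-- ===== PORT B =====
-- str.maketrans("0123456789", "۰۱۲۳۴۵۶۷۸۹"): a dict mapping each ASCII digit to its Persian digit
def pvFaTable : List (Char × Char) :=
  List.zip "0123456789".toList "۰۱۲۳۴۵۶۷۸۹".toList

-- b.translate(table): one pass, each char looked up in the table, kept as-is if absent
def en2fa_alt (i : Int) : String :=
  String.ofList ((PySem.Int.toStr i).toList.map (fun c => ((pvFaTable.lookup c).getD c)))

-- ===== PRECONDITION & SPEC =====
def Spec_en2fa (i : Int) (out : String) : Prop := out = en2fa_alt i
instance (i : Int) (out : String) : Decidable (Spec_en2fa i out) := by unfold Spec_en2fa; infer_instance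

-- ===== CLAIM (what is proved, stated in full; the proofs are below) =====
def Claim_equal_en2fa : Prop := ∀ (i : Int), Dom_en2fa i → Spec_en2fa i (en2fa i)

-- ===== LEMMAS AND PROOFS =====

-- single-char substitution: b.replace(a, b) with |a| = |b| = 1 is a pointwise map
def pvF (a b c : Char) : Char := if c = a then b else c

theorem pv_go_single (a b : Char) :
    ∀ (cs : List Char) (fuel : Nat) (acc : List Char), cs.length ≤ fuel →
      PySem.Chars.replace.go [a] [b] fuel cs acc = acc.reverse ++ cs.map (pvF a b) := by
  intro cs
  induction cs with
  | nil =>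
    intro fuel acc _
    cases fuel <;> simp [PySem.Chars.replace.go]
  | cons c t ih =>
    intro fuel acc h
    cases fuel with
    | zero => simp at h
    | succ f =>
      rw [PySem.Chars.replace.go]
      by_cases hc : c = a
      · subst hc
        have hpre : [c].isPrefixOf (c :: t) = true := by
          simp [List.isPrefixOf]
        simp only [hpre, if_pos, List.length_cons, List.length_nil, List.drop_succ_cons, List.drop_zero]
        have h2 : t.length ≤ f := by simpa using h
        rw [ih f ([b].reverse ++ acc) h2]
        simp [pvF]
      · have hpre : [a].isPrefixOf (c :: t) = false := by
          simp [List.isPrefixOf]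
          intro h'; exact absurd h'.symm hc
        rw [if_neg (by simp [hpre])]
        rw [ih f (c :: acc) (by simpa using h)]
        simp [pvF, hc]

theorem pv_replace_single (a b : Char) (cs : List Char) :
    PySem.Chars.replace cs [a] [b] = cs.map (pvF a b) := by
  rw [PySem.Chars.replace]
  simp only [List.isEmpty_cons, Bool.false_eq_true, if_false]
  simpa using pv_go_single a b cs cs.length [] (le_refl _)

theorem pv_step (cs : List Char) (j : Int) (a b : Char)
    (h1 : (PySem.Int.toStr j).toList = [a])
    (h2 : (((PySem.Str.pyGet? "۰۱۲۳۴۵۶۷۸۹" j).map (fun c => String.ofList [c])).getD "").toList = [b]) :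
    PySem.Str.replace (String.ofList cs) (PySem.Int.toStr j)
        (((PySem.Str.pyGet? "۰۱۲۳۴۵۶۷۸۹" j).map (fun c => String.ofList [c])).getD "")
      = String.ofList (cs.map (pvF a b)) := by
  rw [PySem.Str.replace, h1, h2, String.toList_ofList, pv_replace_single]

theorem pv_chain (c : Char) :
    pvF '9' '۹' (pvF '8' '۸' (pvF '7' '۷' (pvF '6' '۶' (pvF '5' '۵' (pvF '4' '۴'
      (pvF '3' '۳' (pvF '2' '۲' (pvF '1' '۱' (pvF '0' '۰' c)))))))))
      = (pvFaTable.lookup c).getD c := by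
  by_cases h0 : c = '0'
  · subst h0; decide
  by_cases h1 : c = '1'
  · subst h1; decide
  by_cases h2 : c = '2'
  · subst h2; decide
  by_cases h3 : c = '3'
  · subst h3; decide
  by_cases h4 : c = '4'
  · subst h4; decide
  by_cases h5 : c = '5'
  · subst h5; decide
  by_cases h6 : c = '6'
  · subst h6; decide
  by_cases h7 : c = '7'
  · subst h7; decide
  by_cases h8 : c = '8'
  · subst h8; decide
  by_cases h9 : c = '9'
  · subst h9; decide
  rw [show pvFaTable = [('0', '۰'), ('1', '۱'), ('2', '۲'), ('3', '۳'), ('4', '۴'), ('5', '۵'), ('6', '۶'), ('7', '۷'), ('8', '۸'), ('9', '۹')] from by decide]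
  have e0 : (c == '0') = false := by simp [h0]
  have e1 : (c == '1') = false := by simp [h1]
  have e2 : (c == '2') = false := by simp [h2]
  have e3 : (c == '3') = false := by simp [h3]
  have e4 : (c == '4') = false := by simp [h4]
  have e5 : (c == '5') = false := by simp [h5]
  have e6 : (c == '6') = false := by simp [h6]
  have e7 : (c == '7') = false := by simp [h7]
  have e8 : (c == '8') = false := by simp [h8]
  have e9 : (c == '9') = false := by simp [h9]
  simp [pvF, List.lookup, h0, h1, h2, h3, h4, h5, h6, h7, h8, h9, e0, e1, e2, e3, e4, e5, e6, e7, e8, e9]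

set_option maxHeartbeats 2000000 in
theorem en2fa_spec : Claim_equal_en2fa := by
  intro i _
  unfold Spec_en2fa en2fa en2fa_alt
  rw [show PySem.List.pyRange 0 10 1 = [0,1,2,3,4,5,6,7,8,9] from by decide]
  simp only [List.foldl_cons, List.foldl_nil]
  rw [show PySem.Int.toStr i = String.ofList (PySem.Int.toChars i) from rfl]
  rw [pv_step _ 0 '0' '۰' (by decide) (by decide)]
  rw [pv_step _ 1 '1' '۱' (by decide) (by decide)]
  rw [pv_step _ 2 '2' '۲' (by decide) (by decide)]
  rw [pv_step _ 3 '3' '۳' (by decide) (by decide)]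
  rw [pv_step _ 4 '4' '۴' (by decide) (by decide)]
  rw [pv_step _ 5 '5' '۵' (by decide) (by decide)]
  rw [pv_step _ 6 '6' '۶' (by decide) (by decide)]
  rw [pv_step _ 7 '7' '۷' (by decide) (by decide)]
  rw [pv_step _ 8 '8' '۸' (by decide) (by decide)]
  rw [pv_step _ 9 '9' '۹' (by decide) (by decide)]
  rw [String.toList_ofList]
  simp only [List.map_map]
  exact congrArg String.ofList (List.map_congr_left (fun c _ => by
    simpa [Function.comp] using pv_chain c))
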